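-- pv_equiv track=rewrite | github.com/meyersbs/developer-apologies | src/apologies.py | _countApologies
-- ===== SOURCE A (Python) =====
-- APOLOGY_LEMMAS = [
--     "apology", "apologise", "apologize", "blame", "excuse", "fault", "forgive", "mistake",
--     "mistaken", "oops", "pardon", "regret", "sorry"
-- ]
--
-- NON_APOLOGY_LEMMA_PHRASES = [
--     # Apologize
--     ["not", "apologize"],
--     ["n't", "apologize"], # i.e. "won't apologize"
--     # Apologise
--     ["not", "apologise"],
--     ["n't", "apologise"], # i.e. "won't apologise"
--     # Blame
--     ["git", "blame"],
--     ["n't", "blame"], # i.e. "can't blame"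
--     ["not", "to", "blame"],
--     # Fault
--     ["seg", "fault"],
--     ["segmentation", "fault"],
--     ["page", "fault"],
--     ["permission", "fault"],
--     ["protection", "fault"],
--     ["not", "-PRON-", "fault"], # i.e. "not my/our/your/his/her/their fault"
--     # Mistake
--     ["not", "a", "mistake"],
--     # Mistaken
--     ["not", "mistaken"], # i.e. "if I am not mistaken"
--     # Regret
--     ["n't", "regret"], # i.e. "won't regret"
--     # Sorry
--     ["better", "safe", "than", "sorry"],
--     ["not", "sorry"],
-- ]
--
-- def _countNonApologies(lemmas):
--     """
--     Count the occurrences of non apology lemma phrases.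
--
--     GIVEN:
--       lemmas (list -- list of lemmatized text
--
--     RETURN:
--       num_non_apologies -- number of occurrences of non apology lemma phrases
--     """
--     num_non_apologies = 0
--     for non_apology in NON_APOLOGY_LEMMA_PHRASES:
--         num_non_apologies += len(
--             [
--                 # Read this starting with the second line: For each sublist of lemmas with
--                 # length == len(non_apology), if the sublist == non_apology, append non_apology
--                 # to the list. The length of the final list is the number of occurences of
--                 # non_apology in lemmas.
--                 non_apology for i in range(len(lemmas))
--                 if lemmas[i : i + len(non_apology)] == non_apology
--             ]
--         )
--
--     return num_non_apologies
--
-- def _countApologies(lemmas):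
--     """
--     Count the occurrences of apology lemmas in the given lemmas.
--
--     GIVEN:
--       lemmas (str) -- string of lemmatized text
--
--     RETURN:
--       num_apology_lemmas (str) -- number of occurrences of apology lemmas
--     """
--     # Count apology lemmas
--     num_apology_lemmas = 0
--     lems = lemmas.split(" ")
--     for lem in lems:
--         for apology in APOLOGY_LEMMAS:
--             if apology == lem:
--                 num_apology_lemmas += 1
--
--     # Count non apologies
--     num_non_apologies = _countNonApologies(lems)
--     # Subtract non apologies from apologies; if that's somehow negative, set to zero
--     num_apology_lemmas = max(num_apology_lemmas - num_non_apologies, 0)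
--
--     return str(num_apology_lemmas)
-- ===== SOURCE B (Python) =====
-- APOLOGY_LEMMAS = [
--     "apology", "apologise", "apologize", "blame", "excuse", "fault", "forgive", "mistake",
--     "mistaken", "oops", "pardon", "regret", "sorry"
-- ]
--
-- NON_APOLOGY_LEMMA_PHRASES = [
--     ["not", "apologize"], ["n't", "apologize"],
--     ["not", "apologise"], ["n't", "apologise"],
--     ["git", "blame"], ["n't", "blame"], ["not", "to", "blame"],
--     ["seg", "fault"], ["segmentation", "fault"], ["page", "fault"],
--     ["permission", "fault"], ["protection", "fault"], ["not", "-PRON-", "fault"],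
--     ["not", "a", "mistake"], ["not", "mistaken"], ["n't", "regret"],
--     ["better", "safe", "than", "sorry"], ["not", "sorry"],
-- ]
--
--
-- def _buildIndex():
--     """Map each phrase's first word to the phrases starting with it."""
--     index = {}
--     for phrase in NON_APOLOGY_LEMMA_PHRASES:
--         index[phrase[0]] = index.get(phrase[0], []) + [phrase]
--     return index
--
--
-- def _countApologies(lemmas):
--     lems = lemmas.split(" ")
--     index = _buildIndex()
--     num_apologies = 0
--     num_non_apologies = 0
--     for i, lem in enumerate(lems):
--         if lem in APOLOGY_LEMMAS:
--             num_apologies += 1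
--         for phrase in index.get(lem, []):
--             if lems[i:i + len(phrase)] == phrase:
--                 num_non_apologies += 1
--     return str(max(num_apologies - num_non_apologies, 0))
-- ===== Notes on version B (the rewrite author's own statement) =====
-- stated objective: alternative
-- what changed: Replaces the 18 separate full scans of the lemma list (one per non-apology phrase) with a single indexed pass: a dict built once maps each phrase's first word to the phrases starting with it, and one traversal over positions looks up candidates by the word at that position and tallies apology words in the same pass.
import Mathlib
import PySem

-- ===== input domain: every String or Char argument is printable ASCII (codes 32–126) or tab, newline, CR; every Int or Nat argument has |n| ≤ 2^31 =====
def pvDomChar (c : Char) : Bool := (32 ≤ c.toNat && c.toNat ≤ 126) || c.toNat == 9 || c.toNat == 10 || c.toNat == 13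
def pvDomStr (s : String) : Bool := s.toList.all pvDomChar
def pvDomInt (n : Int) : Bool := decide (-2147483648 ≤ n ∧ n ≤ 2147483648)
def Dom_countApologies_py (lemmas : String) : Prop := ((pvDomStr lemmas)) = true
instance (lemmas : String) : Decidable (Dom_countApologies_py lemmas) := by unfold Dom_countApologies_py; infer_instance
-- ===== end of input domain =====

-- B replaces A's 18 per-phrase full scans by one pass over positions using a first-word index dict; same return value.

-- ===== PORT A =====
def apologyLemmas : List String :=
  ["apology", "apologise", "apologize", "blame", "excuse", "fault", "forgive", "mistake",
   "mistaken", "oops", "pardon", "regret", "sorry"]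

def nonApologyPhrases : List (List String) :=
  [["not", "apologize"], ["n't", "apologize"],
   ["not", "apologise"], ["n't", "apologise"],
   ["git", "blame"], ["n't", "blame"], ["not", "to", "blame"],
   ["seg", "fault"], ["segmentation", "fault"], ["page", "fault"],
   ["permission", "fault"], ["protection", "fault"], ["not", "-PRON-", "fault"],
   ["not", "a", "mistake"], ["not", "mistaken"], ["n't", "regret"],
   ["better", "safe", "than", "sorry"], ["not", "sorry"]]

-- _countNonApologies: for each phrase, count positions i with lemmas[i:i+len(phrase)] == phrase
def countNonApologies (lems : List String) : Int :=
  nonApologyPhrases.foldl (fun acc p =>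
    acc + (((PySem.List.pyRange 0 (lems.length : Int) 1).filter
      (fun i => PySem.List.slice lems (some i) (some (i + (p.length : Int))) == p)).length : Int)) 0

def countApologies_py (lemmas : String) : String :=
  let lems := (PySem.Str.split? lemmas " ").getD []   -- sep " " ≠ "", so split? is always some
  let numApology : Int := lems.foldl (fun acc lem =>
    apologyLemmas.foldl (fun a ap => if ap == lem then a + 1 else a) acc) 0
  let numNon : Int := countNonApologies lems
  PySem.Int.toStr (max (numApology - numNon) 0)

-- ===== PORT B =====
-- index[phrase[0]] = index.get(phrase[0], []) + [phrase]; phrase[0] ported as p.headD "" (every phrase is nonempty)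
def buildIndex : PySem.Dict String (List (List String)) :=
  nonApologyPhrases.foldl
    (fun d p => d.insert (p.headD "") (d.getD (p.headD "") [] ++ [p])) PySem.Dict.empty

def countApologies_py_alt (lemmas : String) : String :=
  let lems := (PySem.Str.split? lemmas " ").getD []   -- sep " " ≠ "", so split? is always some
  let counts : Int × Int :=
    (PySem.List.enumerate lems 0).foldl (fun acc il =>
      (buildIndex.getD il.2 []).foldl (fun a p =>
        if PySem.List.slice lems (some il.1) (some (il.1 + (p.length : Int))) == p
        then (a.1, a.2 + 1) else a)
      (if apologyLemmas.contains il.2 then (acc.1 + 1, acc.2) else acc)) (0, 0)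
  PySem.Int.toStr (max (counts.1 - counts.2) 0)

-- ===== PRECONDITION & SPEC =====
def Spec_countApologies_py (lemmas : String) (out : String) : Prop := out = countApologies_py_alt lemmas
instance (lemmas : String) (out : String) : Decidable (Spec_countApologies_py lemmas out) := by unfold Spec_countApologies_py; infer_instance

-- ===== CLAIM (what is proved, stated in full; the proofs are below) =====
def Claim_equal_countApologies_py : Prop := ∀ (lemmas : String), Dom_countApologies_py lemmas → Spec_countApologies_py lemmas (countApologies_py lemmas)

-- ===== LEMMAS AND PROOFS =====

-- A's inner scan over the 13 apology lemmas counts 1 iff lem is one of them (the list has no duplicates)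
lemma inner_apology_fold (lem : String) (acc : Int) :
    apologyLemmas.foldl (fun a ap => if ap == lem then a + 1 else a) acc
    = acc + (if apologyLemmas.contains lem then 1 else 0) := by
  rw [PySem.List.foldl_if_add_one (fun ap => ap == lem)]
  congr 1
  by_cases h : lem ∈ apologyLemmas
  · fin_cases h <;> decide
  · have h1 : List.countP (fun ap => ap == lem) apologyLemmas = 0 := by
      rw [List.countP_eq_zero]
      intro a ha hb
      exact h ((eq_of_beq hb) ▸ ha)
    have h2 : apologyLemmas.contains lem = false := by
      simpa using h
    simp [h1, h]

-- inner candidate fold of B: only the second component moves, by the number of matches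
lemma cand_fold {α : Type} (l : List α) (q : α → Bool) (acc : Int × Int) :
    l.foldl (fun a p => if q p then (a.1, a.2 + 1) else a) acc
    = (acc.1, acc.2 + (l.countP q : Int)) := by
  induction l generalizing acc with
  | nil => simp
  | cons p l ih =>
    rw [List.foldl_cons, ih]
    cases hq : q p <;> simp [hq, Prod.ext_iff] <;> push_cast <;> ring

-- the grouping loop of buildIndex: each key holds exactly the phrases starting with it, in order
lemma group_fold : ∀ (ps : List (List String)) (d : PySem.Dict String (List (List String))) (w : String),
    (ps.foldl (fun d p => d.insert (p.headD "") (d.getD (p.headD "") [] ++ [p])) d).getD w []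
    = d.getD w [] ++ ps.filter (fun p => p.headD "" == w) := by
  intro ps
  induction ps with
  | nil => intro d w; simp
  | cons p ps ih =>
    intro d w
    rw [List.foldl_cons, ih, List.filter_cons]
    rw [PySem.Dict.getD_insert]
    by_cases hw : w = p.headD ""
    · rw [if_pos hw, if_pos (show (p.headD "" == w) = true from beq_iff_eq.mpr hw.symm),
          hw, List.append_assoc]
      rfl
    · rw [if_neg hw, if_neg (show ¬ ((p.headD "" == w) = true) from
          fun e => hw (beq_iff_eq.mp e).symm)]

lemma getD_buildIndex (w : String) :
    buildIndex.getD w [] = nonApologyPhrases.filter (fun p => p.headD "" == w) := by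
  unfold buildIndex
  rw [group_fold]
  simp

-- a nonempty phrase matching at position j starts with the word at position j
lemma first_of_match (lems : List String) (j : Int) (p : List String) (hp : p ≠ [])
    (h0 : 0 ≤ j) (hn : j < (lems.length : Int))
    (hm : PySem.List.slice lems (some j) (some (j + (p.length : Int))) = p) :
    p.headD "" = PySem.List.pyGetD lems j "" := by
  rw [PySem.List.slice_toNat lems h0 (show (0:Int) ≤ j + (p.length : Int) by omega)] at hm
  have hb : (j + (p.length : Int)).toNat - j.toNat = p.length := by omega
  rw [hb] at hm
  rw [PySem.List.pyGetD_eq_getElem lems "" h0 hn]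
  cases p with
  | nil => exact absurd rfl hp
  | cons a q =>
    cases hD : lems.drop j.toNat with
    | nil => rw [hD] at hm; simp at hm
    | cons b rest =>
      rw [hD, List.length_cons, List.take_succ_cons] at hm
      have hba : b = a := (List.cons.injEq _ _ _ _ ▸ hm).1
      have hj : j.toNat < lems.length := by omega
      have hidx : lems[j.toNat]? = some b := by rw [← List.head?_drop, hD]; rfl
      have : lems[j.toNat] = b := by
        have h' := List.getElem?_eq_getElem hj
        rw [hidx] at h'
        exact (Option.some.injEq _ _ ▸ h').symm
      simp [this, hba]

lemma nonempty_phrases : ∀ p ∈ nonApologyPhrases, p ≠ [] := by decide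

-- filtering candidates by the first word loses no matches at a valid position
lemma cnt_at (lems : List String) (j : Int) (h0 : 0 ≤ j) (hn : j < (lems.length : Int)) :
    List.countP (fun p => PySem.List.slice lems (some j) (some (j + (p.length : Int))) == p)
      (buildIndex.getD (PySem.List.pyGetD lems j "") [])
    = List.countP (fun p => PySem.List.slice lems (some j) (some (j + (p.length : Int))) == p)
      nonApologyPhrases := by
  rw [getD_buildIndex, List.countP_filter]
  apply List.countP_congr
  intro p hp
  constructor
  · intro h
    exact (Bool.and_eq_true _ _ ▸ h).1
  · intro hm
    have h1 := first_of_match lems j p (nonempty_phrases p hp) h0 hn (by simpa using hm)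
    rw [Bool.and_eq_true]
    exact ⟨hm, beq_iff_eq.mpr h1⟩

lemma sum_map_add_nat {α : Type} (l : List α) (f g : α → Nat) :
    (l.map fun x => f x + g x).sum = (l.map f).sum + (l.map g).sum := by
  induction l with
  | nil => simp
  | cons a l ih => simp [ih]; omega

lemma sum_map_ite_nat {α : Type} (l : List α) (q : α → Bool) :
    (l.map fun x => if q x then 1 else 0).sum = l.countP q := by
  induction l with
  | nil => simp
  | cons a l ih => cases h : q a <;> simp [h, ih, Nat.add_comm]

-- exchange of the double count: per-position totals equal per-phrase totals
lemma swap_counts (R : List Int) : ∀ (Ps : List (List String)) (m : Int → List String → Bool),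
    (R.map fun j => List.countP (m j) Ps).sum
    = (Ps.map fun p => (R.filter (fun j => m j p)).length).sum := by
  intro Ps
  induction Ps with
  | nil => intro m; simp
  | cons p Ps ih =>
    intro m
    have h1 : (R.map fun j => List.countP (m j) (p :: Ps))
        = (R.map fun j => List.countP (m j) Ps + if m j p then 1 else 0) :=
      List.map_congr_left (fun j _ => List.countP_cons ..)
    rw [h1, sum_map_add_nat, ih, sum_map_ite_nat, List.countP_eq_length_filter,
        List.map_cons, List.sum_cons]
    omega

lemma sum_map_intCast {α : Type} (l : List α) (f : α → Nat) :
    (l.map fun x => ((f x : Nat) : Int)).sum = ((l.map f).sum : Int) := by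
  induction l with
  | nil => simp
  | cons a l ih => simp [ih]

-- B's single pass splits into the two independent tallies
lemma alt_fold (lems : List String) : ∀ (l : List (Int × String)) (ab : Int × Int),
    (l.foldl (fun acc il =>
        (buildIndex.getD il.2 []).foldl (fun a p =>
          if PySem.List.slice lems (some il.1) (some (il.1 + (p.length : Int))) == p
          then (a.1, a.2 + 1) else a)
        (if apologyLemmas.contains il.2 then (acc.1 + 1, acc.2) else acc)) ab)
    = (ab.1 + (l.map fun il => if apologyLemmas.contains il.2 then (1:Int) else 0).sum,
       ab.2 + (l.map fun il => (List.countP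
          (fun p => PySem.List.slice lems (some il.1) (some (il.1 + (p.length : Int))) == p)
          (buildIndex.getD il.2 []) : Int)).sum) := by
  intro l
  induction l with
  | nil => intro ab; simp
  | cons il l ih =>
    intro ab
    rw [List.foldl_cons, cand_fold, ih]
    cases hc : apologyLemmas.contains il.2 <;> simp at hc <;>
      simp [hc, Prod.ext_iff] <;> (try constructor) <;> ring

lemma apology_side (lems : List String) :
    lems.foldl (fun acc lem =>
      apologyLemmas.foldl (fun a ap => if ap == lem then a + 1 else a) acc) 0
    = 0 + ((PySem.List.enumerate lems 0).map fun il =>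
        if apologyLemmas.contains il.2 then (1:Int) else 0).sum := by
  simp only [inner_apology_fold]
  rw [PySem.List.foldl_add]
  congr 1
  rw [show (fun il : Int × String => if apologyLemmas.contains il.2 then (1:Int) else 0)
        = ((fun lem => if apologyLemmas.contains lem then (1:Int) else 0) ∘ Prod.snd) from rfl,
      ← List.map_map, PySem.List.map_snd_enumerate]

lemma non_side (lems : List String) :
    countNonApologies lems
    = 0 + ((PySem.List.enumerate lems 0).map fun il => (List.countP
        (fun p => PySem.List.slice lems (some il.1) (some (il.1 + (p.length : Int))) == p)
        (buildIndex.getD il.2 []) : Int)).sum := by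
  unfold countNonApologies
  rw [PySem.List.foldl_add]
  congr 1
  rw [PySem.List.enumerate_eq_map_pyRange lems "", List.map_map]
  have hmc : ∀ j ∈ PySem.List.pyRange 0 (PySem.List.len lems) 1,
      ((fun il : Int × String => (List.countP
          (fun p => PySem.List.slice lems (some il.1) (some (il.1 + (p.length : Int))) == p)
          (buildIndex.getD il.2 []) : Int)) ∘ (fun j => (j, PySem.List.pyGetD lems j ""))) j
      = (List.countP
          (fun p => PySem.List.slice lems (some j) (some (j + (p.length : Int))) == p)
          nonApologyPhrases : Int) := by
    intro j hj
    have hb := PySem.List.mem_pyRange_one.mp hj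
    simp only [Function.comp]
    rw [cnt_at lems j hb.1 (by simpa [PySem.List.len] using hb.2)]
  rw [List.map_congr_left hmc]
  rw [sum_map_intCast (PySem.List.pyRange 0 (PySem.List.len lems) 1)
        (fun j => List.countP
          (fun p => PySem.List.slice lems (some j) (some (j + (p.length : Int))) == p)
          nonApologyPhrases),
      swap_counts (PySem.List.pyRange 0 (PySem.List.len lems) 1) nonApologyPhrases
        (fun j p => PySem.List.slice lems (some j) (some (j + (p.length : Int))) == p)]
  rw [sum_map_intCast nonApologyPhrases
        (fun p => (List.filter
          (fun i => PySem.List.slice lems (some i) (some (i + (p.length : Int))) == p)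
          (PySem.List.pyRange 0 (lems.length : Int) 1)).length)]
  rw [PySem.List.len_eq]

-- ===== VERDICT (by name: the statement is the Claim_ definition above) =====
theorem countApologies_py_spec : Claim_equal_countApologies_py := by
  intro lemmas _
  unfold Spec_countApologies_py countApologies_py countApologies_py_alt
  dsimp only
  rw [alt_fold ((PySem.Str.split? lemmas " ").getD []),
      apology_side ((PySem.Str.split? lemmas " ").getD []),
      non_side ((PySem.Str.split? lemmas " ").getD [])]
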